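-- pv_equiv track=rewrite | github.com/jjoshua2/arc_agi | unsolved/2025-10-13T00-42-36Z/e73095fd_best1.py | transform
-- ===== SOURCE A (Python) =====
-- def transform(grid_lst: list[list[int]]) -> list[list[int]]:
--     grid = [row[:] for row in grid_lst]
--     if not grid or not grid[0]:
--         return grid
--     rows = len(grid)
--     cols = len(grid[0])
--     for r1 in range(rows):
--         for r2 in range(r1, rows):
--             for c1 in range(cols):
--                 for c2 in range(c1, cols):
--                     # Check if all interior == 0
--                     all_zero = True
--                     for r in range(r1, r2 + 1):
--                         for c in range(c1, c2 + 1):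
--                             if grid[r][c] != 0:
--                                 all_zero = False
--                                 break
--                         if not all_zero:
--                             break
--                     if not all_zero:
--                         continue
--                     # Check borders
--                     valid = True
--                     # Top
--                     if r1 > 0:
--                         for c in range(c1, c2 + 1):
--                             if grid[r1 - 1][c] != 5:
--                                 valid = False
--                                 break
--                     if not valid:
--                         continue
--                     # Bottom
--                     if r2 < rows - 1:
--                         for c in range(c1, c2 + 1):
--                             if grid[r2 + 1][c] != 5:
--                                 valid = False
--                                 break
--                     if not valid:
--                         continue
--                     # Left
--                     if c1 > 0:
--                         for r in range(r1, r2 + 1):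
--                             if grid[r][c1 - 1] != 5:
--                                 valid = False
--                                 break
--                     if not valid:
--                         continue
--                     # Right
--                     if c2 < cols - 1:
--                         for r in range(r1, r2 + 1):
--                             if grid[r][c2 + 1] != 5:
--                                 valid = False
--                                 break
--                     if not valid:
--                         continue
--                     # Fill with 4
--                     for r in range(r1, r2 + 1):
--                         for c in range(c1, c2 + 1):
--                             grid[r][c] = 4
--     return grid
-- ===== SOURCE B (Python) =====
-- def _pref(grid, R, C, pred):
--     # 2D prefix table: tab[i][j] = number of cells (r,c), r<i, c<j (c limited to the C leading columns) with pred true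
--     tab = [[0] * (C + 1)]
--     for r in range(R):
--         prev = tab[r]
--         row = [0]
--         for c in range(C):
--             row.append(prev[c + 1] + row[c] - prev[c] + (1 if pred(grid[r][c]) else 0))
--         tab.append(row)
--     return tab
--
--
-- def transform(grid_lst: list[list[int]]) -> list[list[int]]:
--     grid = [row[:] for row in grid_lst]
--     if not grid or not grid[0]:
--         return grid
--     R, C = len(grid), len(grid[0])
--     nz = _pref(grid, R, C, lambda v: v != 0)   # nonzero cells
--     f5 = _pref(grid, R, C, lambda v: v == 5)   # cells equal to 5
--
--     def cnt(t, r1, r2, c1, c2):  # inclusive rectangle count in O(1)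
--         return t[r2 + 1][c2 + 1] - t[r1][c2 + 1] - t[r2 + 1][c1] + t[r1][c1]
--
--     for r1 in range(R):
--         for r2 in range(r1, R):
--             for c1 in range(C):
--                 for c2 in range(c1, C):
--                     if cnt(nz, r1, r2, c1, c2) != 0:
--                         continue
--                     if r1 > 0 and cnt(f5, r1 - 1, r1 - 1, c1, c2) != c2 - c1 + 1:
--                         continue
--                     if r2 < R - 1 and cnt(f5, r2 + 1, r2 + 1, c1, c2) != c2 - c1 + 1:
--                         continue
--                     if c1 > 0 and cnt(f5, r1, r2, c1 - 1, c1 - 1) != r2 - r1 + 1: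
--                         continue
--                     if c2 < C - 1 and cnt(f5, r1, r2, c2 + 1, c2 + 1) != r2 - r1 + 1:
--                         continue
--                     grid = [[4 if r1 <= r <= r2 and c1 <= c <= c2 else v
--                              for c, v in enumerate(row)] if r1 <= r <= r2 else row
--                             for r, row in enumerate(grid)]
--     return grid
-- ===== Notes on version B (the rewrite author's own statement) =====
-- stated objective: alternative
-- what changed: B precomputes 2D prefix-sum tables of nonzero and 5-valued cells once and checks each rectangle's interior and borders in O(1) against the original grid, collecting its fills without re-reading its own writes (filled rectangles are provably disjoint, so A's reads of the mutated grid never change a verdict), instead of A's O(area) re-scans per rectangle.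
import Mathlib
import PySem

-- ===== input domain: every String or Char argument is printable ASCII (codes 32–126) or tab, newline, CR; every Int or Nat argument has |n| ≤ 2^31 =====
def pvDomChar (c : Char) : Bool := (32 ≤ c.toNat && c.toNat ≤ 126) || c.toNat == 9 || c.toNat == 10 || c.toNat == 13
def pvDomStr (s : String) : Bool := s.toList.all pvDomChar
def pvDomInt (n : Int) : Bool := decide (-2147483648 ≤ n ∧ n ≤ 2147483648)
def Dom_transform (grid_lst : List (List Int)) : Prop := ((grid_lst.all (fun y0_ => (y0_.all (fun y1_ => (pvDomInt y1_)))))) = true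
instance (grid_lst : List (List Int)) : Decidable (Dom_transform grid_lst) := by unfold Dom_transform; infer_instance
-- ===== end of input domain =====

-- B checks each rectangle in O(1) against prefix-sum tables of the original grid instead of
-- A's per-rectangle re-scans of the mutated grid; filled rectangles are disjoint (proved below),
-- so the verdicts agree.

-- ===== PORT A =====
-- grid[r][c]: exact for in-range indices; Pre_transform guarantees every access A makes is in range
def gget (g : List (List Int)) (r c : Nat) : Int := (g.getD r []).getD c 0

def rng (a b : Nat) : List Nat := List.range' a (b + 1 - a)   -- Python range(a, b+1)

-- A's interior / border scan loops (a break-on-failure scan is an and-fold)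
def allZero (g : List (List Int)) (r1 r2 c1 c2 : Nat) : Bool :=
  (rng r1 r2).all fun r => (rng c1 c2).all fun c => gget g r c == 0
def rowAll5 (g : List (List Int)) (r c1 c2 : Nat) : Bool :=
  (rng c1 c2).all fun c => gget g r c == 5
def colAll5 (g : List (List Int)) (c r1 r2 : Nat) : Bool :=
  (rng r1 r2).all fun r => gget g r c == 5

-- A's chain of checks with `continue` (top, bottom, left, right)
def qual (g : List (List Int)) (rows cols r1 r2 c1 c2 : Nat) : Bool :=
  allZero g r1 r2 c1 c2 &&
  (!(decide (0 < r1)) || rowAll5 g (r1 - 1) c1 c2) &&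
  (!(decide (r2 < rows - 1)) || rowAll5 g (r2 + 1) c1 c2) &&
  (!(decide (0 < c1)) || colAll5 g (c1 - 1) r1 r2) &&
  (!(decide (c2 < cols - 1)) || colAll5 g (c2 + 1) r1 r2)

-- A's fill loops: grid[r][c] = 4
def fillA (g : List (List Int)) (r1 r2 c1 c2 : Nat) : List (List Int) :=
  (rng r1 r2).foldl
    (fun g r => g.modify r (fun row => (rng c1 c2).foldl (fun row c => row.set c 4) row)) g

-- the four nested loops over rectangles, flattened in iteration order
def rects (rows cols : Nat) : List (Nat × Nat × Nat × Nat) :=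
  (List.range rows).flatMap fun r1 => (rng r1 (rows - 1)).flatMap fun r2 =>
    (List.range cols).flatMap fun c1 => (rng c1 (cols - 1)).map fun c2 => (r1, r2, c1, c2)

def stepA (rows cols : Nat) (g : List (List Int)) (x : Nat × Nat × Nat × Nat) : List (List Int) :=
  if qual g rows cols x.1 x.2.1 x.2.2.1 x.2.2.2 then fillA g x.1 x.2.1 x.2.2.1 x.2.2.2 else g

def transform (grid_lst : List (List Int)) : List (List Int) :=
  if grid_lst.isEmpty || grid_lst.headI.isEmpty then grid_lst
  else
    let rows := grid_lst.length
    let cols := grid_lst.headI.length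
    (rects rows cols).foldl (stepA rows cols) grid_lst

-- ===== PORT B =====
-- one row of the prefix table (_pref's inner loop; row[c] built by appending)
def prefRow (prev : List Int) (g : List (List Int)) (r C : Nat) (ind : Int → Bool) : List Int :=
  (List.range C).foldl
    (fun row c => row ++ [prev.getD (c + 1) 0 + row.getD c 0 - prev.getD c 0 +
        (if ind (gget g r c) then 1 else 0)])
    [0]

-- _pref: tab[i][j] = number of cells (r,c), r<i, c<j, with ind true
def prefTab (g : List (List Int)) (R C : Nat) (ind : Int → Bool) : List (List Int) :=
  (List.range R).foldl (fun tab r => tab ++ [prefRow (tab.getD r []) g r C ind])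
    [List.replicate (C + 1) (0 : Int)]

-- cnt: inclusive-rectangle count in O(1)
def cnt (t : List (List Int)) (r1 r2 c1 c2 : Nat) : Int :=
  gget t (r2 + 1) (c2 + 1) - gget t r1 (c2 + 1) - gget t (r2 + 1) c1 + gget t r1 c1

-- B's chain of O(1) checks (same order as its `continue`s)
def checkB (nz f5 : List (List Int)) (R C r1 r2 c1 c2 : Nat) : Bool :=
  cnt nz r1 r2 c1 c2 == 0 &&
  (!(decide (0 < r1)) || cnt f5 (r1 - 1) (r1 - 1) c1 c2 == ((c2 - c1 + 1 : Nat) : Int)) &&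
  (!(decide (r2 < R - 1)) || cnt f5 (r2 + 1) (r2 + 1) c1 c2 == ((c2 - c1 + 1 : Nat) : Int)) &&
  (!(decide (0 < c1)) || cnt f5 r1 r2 (c1 - 1) (c1 - 1) == ((r2 - r1 + 1 : Nat) : Int)) &&
  (!(decide (c2 < C - 1)) || cnt f5 r1 r2 (c2 + 1) (c2 + 1) == ((r2 - r1 + 1 : Nat) : Int))

-- B's fill: comprehension rebuilding the grid (enumerate → mapIdx)
def fillB (g : List (List Int)) (r1 r2 c1 c2 : Nat) : List (List Int) :=
  g.mapIdx fun r row =>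
    if r1 ≤ r ∧ r ≤ r2 then row.mapIdx (fun c v => if c1 ≤ c ∧ c ≤ c2 then 4 else v) else row

def stepB (nz f5 : List (List Int)) (R C : Nat) (g : List (List Int))
    (x : Nat × Nat × Nat × Nat) : List (List Int) :=
  if checkB nz f5 R C x.1 x.2.1 x.2.2.1 x.2.2.2 then fillB g x.1 x.2.1 x.2.2.1 x.2.2.2 else g

def transform_alt (grid_lst : List (List Int)) : List (List Int) :=
  if grid_lst.isEmpty || grid_lst.headI.isEmpty then grid_lst
  else
    let R := grid_lst.length
    let C := grid_lst.headI.length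
    let nz := prefTab grid_lst R C (fun v => v != 0)
    let f5 := prefTab grid_lst R C (fun v => v == 5)
    (rects R C).foldl (stepB nz f5 R C) grid_lst

-- ===== PRECONDITION & SPEC =====
-- Pre_: every row at least as long as row 0 — exactly the grids on which A does not raise
-- IndexError (A reads grid[r][c] for every r and every c < len(grid[0])).
def Pre_transform (grid_lst : List (List Int)) : Prop :=
  ∀ row ∈ grid_lst, grid_lst.headI.length ≤ row.length
instance (grid_lst : List (List Int)) : Decidable (Pre_transform grid_lst) := by
  unfold Pre_transform; infer_instance

def pvWitness_transform : List (List Int) := [[0]]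

def Spec_transform (grid_lst : List (List Int)) (out : List (List Int)) : Prop := out = transform_alt grid_lst
instance (grid_lst : List (List Int)) (out : List (List Int)) : Decidable (Spec_transform grid_lst out) := by unfold Spec_transform; infer_instance

-- ===== CLAIM (what is proved, stated in full; the proofs are below) =====
def Claim_equal_transform : Prop := ∀ (grid_lst : List (List Int)), Dom_transform grid_lst → Pre_transform grid_lst → Spec_transform grid_lst (transform grid_lst)

-- ===== LEMMAS AND PROOFS =====



lemma ext_gget (g g' : List (List Int)) (hlen : g.length = g'.length)
    (hrow : ∀ r, r < g.length → (g.getD r []).length = (g'.getD r []).length)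
    (hcell : ∀ r c, r < g.length → c < (g.getD r []).length → gget g r c = gget g' r c) :
    g = g' := by
  apply List.ext_getElem?
  intro r
  by_cases hr : r < g.length
  · have hr' : r < g'.length := by omega
    have hgr : g.getD r [] = g[r] := List.getD_eq_getElem _ _ hr
    have hgr' : g'.getD r [] = g'[r] := List.getD_eq_getElem _ _ hr'
    rw [List.getElem?_eq_getElem hr, List.getElem?_eq_getElem hr']
    congr 1
    apply List.ext_getElem?
    intro c
    by_cases hc : c < g[r].length
    · have hc2 : c < (g.getD r []).length := by rw [hgr]; exact hc
      have hc' : c < g'[r].length := by have := hrow r hr; rw [hgr, hgr'] at this; omega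
      rw [List.getElem?_eq_getElem hc, List.getElem?_eq_getElem hc']
      have := hcell r c hr hc2
      simp only [gget, hgr, hgr'] at this
      rw [List.getD_eq_getElem _ _ hc, List.getD_eq_getElem _ _ hc'] at this
      simpa using this
    · have hc' : ¬ c < g'[r].length := by have := hrow r hr; rw [hgr, hgr'] at this; omega
      rw [List.getElem?_eq_none (by omega), List.getElem?_eq_none (by omega)]
  · rw [List.getElem?_eq_none (by omega), List.getElem?_eq_none (by omega)]

lemma length_fillB (g : List (List Int)) (r1 r2 c1 c2 : Nat) :
    (fillB g r1 r2 c1 c2).length = g.length := by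
  simp [fillB]

lemma rowlen_fillB (g : List (List Int)) (r1 r2 c1 c2 r : Nat) :
    ((fillB g r1 r2 c1 c2).getD r []).length = ((g.getD r []).length) := by
  unfold fillB
  by_cases hr : r < g.length
  · rw [List.getD_eq_getElem?_getD, List.getD_eq_getElem?_getD, List.getElem?_mapIdx,
      List.getElem?_eq_getElem hr]
    simp only [Option.map_some, Option.getD_some]
    split <;> simp
  · rw [List.getD_eq_getElem?_getD, List.getD_eq_getElem?_getD, List.getElem?_mapIdx,
      List.getElem?_eq_none (by omega)]
    rfl

lemma gget_fillB (g : List (List Int)) (r1 r2 c1 c2 r c : Nat) :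
    gget (fillB g r1 r2 c1 c2) r c =
      if r1 ≤ r ∧ r ≤ r2 ∧ c1 ≤ c ∧ c ≤ c2 ∧ r < g.length ∧ c < (g.getD r []).length
      then 4 else gget g r c := by
  by_cases hr : r < g.length
  · have hgr : g.getD r [] = g[r] := List.getD_eq_getElem _ _ hr
    have hrow : (fillB g r1 r2 c1 c2).getD r [] =
        (if r1 ≤ r ∧ r ≤ r2 then (g[r]).mapIdx (fun c v => if c1 ≤ c ∧ c ≤ c2 then 4 else v)
         else g[r]) := by
      rw [fillB, List.getD_eq_getElem?_getD, List.getElem?_mapIdx, List.getElem?_eq_getElem hr]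
      rfl
    unfold gget
    rw [hrow, hgr]
    by_cases hrr : r1 ≤ r ∧ r ≤ r2
    · rw [if_pos hrr]
      by_cases hc : c < g[r].length
      · rw [List.getD_eq_getElem?_getD (l := (g[r]).mapIdx _), List.getElem?_mapIdx,
          List.getElem?_eq_getElem hc]
        simp only [Option.map_some, Option.getD_some]
        rw [List.getD_eq_getElem _ _ hc]
        have hc2 : c < (g.getD r []).length := by rw [hgr]; exact hc
        split_ifs with h1 h2 h2 <;> simp_all
      · rw [List.getD_eq_getElem?_getD (l := (g[r]).mapIdx _),
          List.getElem?_eq_none (by simpa using (by omega : g[r].length ≤ c))]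
        rw [List.getD_eq_getElem?_getD (l := g[r]), List.getElem?_eq_none (by omega)]
        rw [if_neg (by intro h; exact hc h.2.2.2.2.2)]
    · rw [if_neg hrr]
      rw [if_neg (by intro h; exact hrr ⟨h.1, h.2.1⟩)]
  · have h1 : (fillB g r1 r2 c1 c2).getD r [] = [] := by
      rw [fillB, List.getD_eq_getElem?_getD, List.getElem?_mapIdx, List.getElem?_eq_none (by omega)]
      rfl
    have h2 : g.getD r [] = [] := by
      rw [List.getD_eq_getElem?_getD, List.getElem?_eq_none (by omega)]
      rfl
    unfold gget
    rw [h1, h2, if_neg (by intro h; exact hr h.2.2.2.2.1)]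

lemma setfold_len (row : List Int) (a n : Nat) :
    ((List.range' a n).foldl (fun r c => r.set c (4:Int)) row).length = row.length := by
  induction n generalizing row a with
  | zero => rfl
  | succ n ih => rw [List.range'_succ, List.foldl_cons, ih, List.length_set]

lemma setfold_getD (row : List Int) (a n c : Nat) :
    ((List.range' a n).foldl (fun r c => r.set c (4:Int)) row).getD c 0 =
      if a ≤ c ∧ c < a + n ∧ c < row.length then 4 else row.getD c 0 := by
  induction n generalizing row a with
  | zero => rw [if_neg (by omega)]; rfl
  | succ n ih =>
    rw [List.range'_succ, List.foldl_cons, ih]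
    have hset : (row.set a (4:Int)).getD c 0 = if a = c ∧ a < row.length then 4 else row.getD c 0 := by
      rw [List.getD_eq_getElem?_getD, List.getElem?_set]
      by_cases h1 : a = c
      · by_cases h2 : a < row.length
        · subst h1; simp [h2]
        · rw [if_pos h1, if_neg h2, if_neg (by tauto)]
          rw [List.getD_eq_getElem?_getD, List.getElem?_eq_none (by omega)]
      · rw [if_neg h1, if_neg (by tauto), List.getD_eq_getElem?_getD]
    rw [List.length_set, hset]
    split_ifs <;> first | rfl | omega

lemma modfold_len (g : List (List Int)) (f : List Int → List Int) (a n : Nat) :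
    ((List.range' a n).foldl (fun g r => g.modify r f) g).length = g.length := by
  induction n generalizing g a with
  | zero => rfl
  | succ n ih => rw [List.range'_succ, List.foldl_cons, ih, List.length_modify]

lemma modfold_getD (g : List (List Int)) (f : List Int → List Int) (a n r : Nat) :
    (((List.range' a n).foldl (fun g r => g.modify r f) g).getD r []) =
      if a ≤ r ∧ r < a + n ∧ r < g.length then f (g.getD r []) else g.getD r [] := by
  induction n generalizing g a with
  | zero => rw [if_neg (by omega)]; rfl
  | succ n ih =>
    rw [List.range'_succ, List.foldl_cons, ih, List.length_modify]
    have hmod : (g.modify a f).getD r [] =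
        if a = r ∧ r < g.length then f (g.getD r []) else g.getD r [] := by
      rw [List.getD_eq_getElem?_getD, List.getElem?_modify]
      by_cases h1 : a = r
      · subst h1
        by_cases h2 : a < g.length
        · rw [List.getElem?_eq_getElem h2, if_pos (⟨rfl, h2⟩ : a = a ∧ a < g.length),
            List.getD_eq_getElem _ _ h2]
          simp
        · rw [List.getElem?_eq_none (by omega), if_neg (by tauto)]
          rw [List.getD_eq_getElem?_getD, List.getElem?_eq_none (by omega)]
          rfl
      · rw [if_neg (by tauto), List.getD_eq_getElem?_getD]
        rcases h : g[r]? with _ | v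
        · rfl
        · simp [h1]
    rw [hmod]
    split_ifs <;> first | rfl | omega

lemma length_fillA (g : List (List Int)) (r1 r2 c1 c2 : Nat) :
    (fillA g r1 r2 c1 c2).length = g.length := by
  unfold fillA rng
  rw [modfold_len]

lemma rowlen_fillA (g : List (List Int)) (r1 r2 c1 c2 r : Nat) :
    ((fillA g r1 r2 c1 c2).getD r []).length = ((g.getD r []).length) := by
  unfold fillA rng
  rw [modfold_getD]
  split_ifs
  · rw [setfold_len]
  · rfl

lemma gget_fillA (g : List (List Int)) (r1 r2 c1 c2 r c : Nat) :
    gget (fillA g r1 r2 c1 c2) r c =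
      if r1 ≤ r ∧ r ≤ r2 ∧ c1 ≤ c ∧ c ≤ c2 ∧ r < g.length ∧ c < (g.getD r []).length
      then 4 else gget g r c := by
  unfold fillA rng gget
  rw [modfold_getD]
  by_cases hr : r1 ≤ r ∧ r < r1 + (r2 + 1 - r1) ∧ r < g.length
  · rw [if_pos hr, setfold_getD]
    split_ifs <;> first | rfl | omega
  · rw [if_neg hr, if_neg (by omega)]

lemma fillA_eq_fillB (g : List (List Int)) (r1 r2 c1 c2 : Nat) :
    fillA g r1 r2 c1 c2 = fillB g r1 r2 c1 c2 := by
  apply ext_gget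
  · rw [length_fillA, length_fillB]
  · intro r _; rw [rowlen_fillA, rowlen_fillB]
  · intro r c hr hc
    rw [gget_fillA, gget_fillB]

lemma mem_rng {a b x : Nat} : x ∈ rng a b ↔ a ≤ x ∧ x ≤ b := by
  unfold rng; rw [List.mem_range'_1]; omega

lemma allZero_iff (g : List (List Int)) (r1 r2 c1 c2 : Nat) :
    allZero g r1 r2 c1 c2 = true ↔
      ∀ r c, r1 ≤ r → r ≤ r2 → c1 ≤ c → c ≤ c2 → gget g r c = 0 := by
  simp only [allZero, List.all_eq_true, mem_rng, beq_iff_eq]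
  constructor
  · intro h r c h1 h2 h3 h4; exact h r ⟨h1, h2⟩ c ⟨h3, h4⟩
  · intro h r hr c hc; exact h r c hr.1 hr.2 hc.1 hc.2

lemma rowAll5_iff (g : List (List Int)) (r c1 c2 : Nat) :
    rowAll5 g r c1 c2 = true ↔ ∀ c, c1 ≤ c → c ≤ c2 → gget g r c = 5 := by
  simp only [rowAll5, List.all_eq_true, mem_rng, beq_iff_eq]
  constructor
  · intro h c h1 h2; exact h c ⟨h1, h2⟩
  · intro h c hc; exact h c hc.1 hc.2

lemma colAll5_iff (g : List (List Int)) (c r1 r2 : Nat) :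
    colAll5 g c r1 r2 = true ↔ ∀ r, r1 ≤ r → r ≤ r2 → gget g r c = 5 := by
  simp only [colAll5, List.all_eq_true, mem_rng, beq_iff_eq]
  constructor
  · intro h r h1 h2; exact h r ⟨h1, h2⟩
  · intro h r hr; exact h r hr.1 hr.2

def fills (g0 : List (List Int)) (F : List (Nat × Nat × Nat × Nat)) : List (List Int) :=
  F.foldl (fun g x => fillB g x.1 x.2.1 x.2.2.1 x.2.2.2) g0

def InCellB (x : Nat × Nat × Nat × Nat) (r c : Nat) : Bool :=
  decide (x.1 ≤ r ∧ r ≤ x.2.1 ∧ x.2.2.1 ≤ c ∧ c ≤ x.2.2.2)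

def InRange (R C : Nat) (x : Nat × Nat × Nat × Nat) : Prop :=
  x.1 ≤ x.2.1 ∧ x.2.1 < R ∧ x.2.2.1 ≤ x.2.2.2 ∧ x.2.2.2 < C

def Ok0 (g0 : List (List Int)) (R C : Nat) (x : Nat × Nat × Nat × Nat) : Prop :=
  InRange R C x ∧ qual g0 R C x.1 x.2.1 x.2.2.1 x.2.2.2 = true

lemma length_fills (g0 : List (List Int)) (F : List (Nat × Nat × Nat × Nat)) :
    (fills g0 F).length = g0.length := by
  induction F generalizing g0 with
  | nil => rfl
  | cons x F ih =>
    show (fills (fillB g0 x.1 x.2.1 x.2.2.1 x.2.2.2) F).length = g0.length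
    rw [ih, length_fillB]

lemma rowlen_fills (g0 : List (List Int)) (F : List (Nat × Nat × Nat × Nat)) (r : Nat) :
    ((fills g0 F).getD r []).length = (g0.getD r []).length := by
  induction F generalizing g0 with
  | nil => rfl
  | cons x F ih =>
    show ((fills (fillB g0 x.1 x.2.1 x.2.2.1 x.2.2.2) F).getD r []).length = _
    rw [ih, rowlen_fillB]

lemma gget_fills (g0 : List (List Int)) (F : List (Nat × Nat × Nat × Nat)) (r c : Nat) :
    gget (fills g0 F) r c =
      if r < g0.length ∧ c < (g0.getD r []).length ∧ F.any (fun x => InCellB x r c) = true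
      then 4 else gget g0 r c := by
  induction F generalizing g0 with
  | nil => rw [if_neg (by simp)]; rfl
  | cons x F ih =>
    show gget (fills (fillB g0 x.1 x.2.1 x.2.2.1 x.2.2.2) F) r c = _
    rw [ih, length_fillB, rowlen_fillB, gget_fillB]
    simp only [List.any_cons, Bool.or_eq_true, InCellB, decide_eq_true_eq]
    split_ifs <;> first | rfl | tauto

lemma qual_interior {g : List (List Int)} {R C r1 r2 c1 c2 : Nat}
    (h : qual g R C r1 r2 c1 c2 = true) :
    ∀ r c, r1 ≤ r → r ≤ r2 → c1 ≤ c → c ≤ c2 → gget g r c = 0 := by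
  simp only [qual, Bool.and_eq_true] at h
  exact (allZero_iff _ _ _ _ _).mp h.1.1.1.1

lemma qual_top {g : List (List Int)} {R C r1 r2 c1 c2 : Nat}
    (h : qual g R C r1 r2 c1 c2 = true) (h0 : 0 < r1) :
    ∀ c, c1 ≤ c → c ≤ c2 → gget g (r1 - 1) c = 5 := by
  simp only [qual, Bool.and_eq_true, Bool.or_eq_true] at h
  rcases h.1.1.1.2 with hg | hall
  · simp only [Bool.not_eq_true', decide_eq_false_iff_not] at hg; omega
  · exact (rowAll5_iff _ _ _ _).mp hall

lemma qual_bottom {g : List (List Int)} {R C r1 r2 c1 c2 : Nat}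
    (h : qual g R C r1 r2 c1 c2 = true) (h0 : r2 < R - 1) :
    ∀ c, c1 ≤ c → c ≤ c2 → gget g (r2 + 1) c = 5 := by
  simp only [qual, Bool.and_eq_true, Bool.or_eq_true] at h
  rcases h.1.1.2 with hg | hall
  · simp only [Bool.not_eq_true', decide_eq_false_iff_not] at hg; omega
  · exact (rowAll5_iff _ _ _ _).mp hall

lemma qual_left {g : List (List Int)} {R C r1 r2 c1 c2 : Nat}
    (h : qual g R C r1 r2 c1 c2 = true) (h0 : 0 < c1) :
    ∀ r, r1 ≤ r → r ≤ r2 → gget g r (c1 - 1) = 5 := by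
  simp only [qual, Bool.and_eq_true, Bool.or_eq_true] at h
  rcases h.1.2 with hg | hall
  · simp only [Bool.not_eq_true', decide_eq_false_iff_not] at hg; omega
  · exact (colAll5_iff _ _ _ _).mp hall

lemma qual_right {g : List (List Int)} {R C r1 r2 c1 c2 : Nat}
    (h : qual g R C r1 r2 c1 c2 = true) (h0 : c2 < C - 1) :
    ∀ r, r1 ≤ r → r ≤ r2 → gget g r (c2 + 1) = 5 := by
  simp only [qual, Bool.and_eq_true, Bool.or_eq_true] at h
  rcases h.2 with hg | hall
  · simp only [Bool.not_eq_true', decide_eq_false_iff_not] at hg; omega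
  · exact (colAll5_iff _ _ _ _).mp hall

lemma dir_row {g : List (List Int)} {R C a1 b1 c1 d1 a2 b2 c2 d2 rr cc : Nat}
    (hx : qual g R C a1 b1 c1 d1 = true) (hy : qual g R C a2 b2 c2 d2 = true)
    (hov : a1 ≤ rr ∧ rr ≤ b1 ∧ a2 ≤ rr ∧ rr ≤ b2 ∧ c1 ≤ cc ∧ cc ≤ d1 ∧ c2 ≤ cc ∧ cc ≤ d2)
    (hlt : a1 < a2) : False := by
  obtain ⟨h1, h2, h3, h4, h5, h6, h7, h8⟩ := hov
  have ha := qual_top hy (by omega) cc h7 h8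
  have hb := qual_interior hx (a2 - 1) cc (by omega) (by omega) h5 h6
  rw [hb] at ha; exact absurd ha (by norm_num)

lemma dir_row_bot {g : List (List Int)} {R C a1 b1 c1 d1 a2 b2 c2 d2 rr cc : Nat}
    (hx : qual g R C a1 b1 c1 d1 = true) (hy : qual g R C a2 b2 c2 d2 = true)
    (hb2 : b2 < R)
    (hov : a1 ≤ rr ∧ rr ≤ b1 ∧ a2 ≤ rr ∧ rr ≤ b2 ∧ c1 ≤ cc ∧ cc ≤ d1 ∧ c2 ≤ cc ∧ cc ≤ d2)
    (hlt : b1 < b2) : False := by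
  obtain ⟨h1, h2, h3, h4, h5, h6, h7, h8⟩ := hov
  have ha := qual_bottom hx (by omega) cc h5 h6
  have hb := qual_interior hy (b1 + 1) cc (by omega) (by omega) h7 h8
  rw [hb] at ha; exact absurd ha (by norm_num)

lemma dir_col {g : List (List Int)} {R C a1 b1 c1 d1 a2 b2 c2 d2 rr cc : Nat}
    (hx : qual g R C a1 b1 c1 d1 = true) (hy : qual g R C a2 b2 c2 d2 = true)
    (hov : a1 ≤ rr ∧ rr ≤ b1 ∧ a2 ≤ rr ∧ rr ≤ b2 ∧ c1 ≤ cc ∧ cc ≤ d1 ∧ c2 ≤ cc ∧ cc ≤ d2)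
    (hlt : c1 < c2) : False := by
  obtain ⟨h1, h2, h3, h4, h5, h6, h7, h8⟩ := hov
  have ha := qual_left hy (by omega) rr h3 h4
  have hb := qual_interior hx rr (c2 - 1) h1 h2 (by omega) (by omega)
  rw [hb] at ha; exact absurd ha (by norm_num)

lemma dir_col_right {g : List (List Int)} {R C a1 b1 c1 d1 a2 b2 c2 d2 rr cc : Nat}
    (hx : qual g R C a1 b1 c1 d1 = true) (hy : qual g R C a2 b2 c2 d2 = true)
    (hd2 : d2 < C)
    (hov : a1 ≤ rr ∧ rr ≤ b1 ∧ a2 ≤ rr ∧ rr ≤ b2 ∧ c1 ≤ cc ∧ cc ≤ d1 ∧ c2 ≤ cc ∧ cc ≤ d2)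
    (hlt : d1 < d2) : False := by
  obtain ⟨h1, h2, h3, h4, h5, h6, h7, h8⟩ := hov
  have ha := qual_right hx (by omega) rr h1 h2
  have hb := qual_interior hy rr (d1 + 1) h3 h4 (by omega) (by omega)
  rw [hb] at ha; exact absurd ha (by norm_num)

lemma overlap_eq {g : List (List Int)} {R C : Nat} {x y : Nat × Nat × Nat × Nat}
    (hx : Ok0 g R C x) (hy : Ok0 g R C y) {rr cc : Nat}
    (h1 : InCellB x rr cc = true) (h2 : InCellB y rr cc = true) : x = y := by
  obtain ⟨a1, b1, c1, d1⟩ := x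
  obtain ⟨a2, b2, c2, d2⟩ := y
  simp only [InCellB, decide_eq_true_eq] at h1 h2
  obtain ⟨hx_in, hx_q⟩ := hx
  obtain ⟨hy_in, hy_q⟩ := hy
  have hx_q' : qual g R C a1 b1 c1 d1 = true := hx_q
  have hy_q' : qual g R C a2 b2 c2 d2 = true := hy_q
  have hxb : b1 < R := hx_in.2.1
  have hxd : d1 < C := hx_in.2.2.2
  have hyb : b2 < R := hy_in.2.1
  have hyd : d2 < C := hy_in.2.2.2
  have hov : a1 ≤ rr ∧ rr ≤ b1 ∧ a2 ≤ rr ∧ rr ≤ b2 ∧ c1 ≤ cc ∧ cc ≤ d1 ∧ c2 ≤ cc ∧ cc ≤ d2 :=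
    ⟨h1.1, h1.2.1, h2.1, h2.2.1, h1.2.2.1, h1.2.2.2, h2.2.2.1, h2.2.2.2⟩
  have hov' : a2 ≤ rr ∧ rr ≤ b2 ∧ a1 ≤ rr ∧ rr ≤ b1 ∧ c2 ≤ cc ∧ cc ≤ d2 ∧ c1 ≤ cc ∧ cc ≤ d1 :=
    ⟨h2.1, h2.2.1, h1.1, h1.2.1, h2.2.2.1, h2.2.2.2, h1.2.2.1, h1.2.2.2⟩
  have e1 : a1 = a2 := by
    by_contra hne
    rcases Nat.lt_or_ge a1 a2 with h | h
    · exact dir_row hx_q' hy_q' hov h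
    · exact dir_row hy_q' hx_q' hov' (by omega)
  have e2 : b1 = b2 := by
    by_contra hne
    rcases Nat.lt_or_ge b1 b2 with h | h
    · exact dir_row_bot hx_q' hy_q' hyb hov h
    · exact dir_row_bot hy_q' hx_q' hxb hov' (by omega)
  have e3 : c1 = c2 := by
    by_contra hne
    rcases Nat.lt_or_ge c1 c2 with h | h
    · exact dir_col hx_q' hy_q' hov h
    · exact dir_col hy_q' hx_q' hov' (by omega)
  have e4 : d1 = d2 := by
    by_contra hne
    rcases Nat.lt_or_ge d1 d2 with h | h
    · exact dir_col_right hx_q' hy_q' hyd hov h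
    · exact dir_col_right hy_q' hx_q' hxd hov' (by omega)
  simp only [Prod.mk.injEq]
  exact ⟨e1, e2, e3, e4⟩

def S (g : List (List Int)) (ind : Int → Bool) (i j : Nat) : Int :=
  ∑ r ∈ Finset.range i, ∑ c ∈ Finset.range j, (if ind (gget g r c) then (1 : Int) else 0)

def rcnt (g : List (List Int)) (ind : Int → Bool) (r1 r2 c1 c2 : Nat) : Int :=
  ∑ r ∈ Finset.Ico r1 (r2 + 1), ∑ c ∈ Finset.Ico c1 (c2 + 1),
    (if ind (gget g r c) then (1 : Int) else 0)

lemma bool_eq_of_iff {a b : Bool} (h : a = true ↔ b = true) : a = b := by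
  cases a <;> cases b <;> simp_all

lemma S_succ_right (g : List (List Int)) (ind : Int → Bool) (i j : Nat) :
    S g ind i (j + 1) = S g ind i j + ∑ r ∈ Finset.range i, (if ind (gget g r j) then (1:Int) else 0) := by
  simp only [S]
  rw [← Finset.sum_add_distrib]
  exact Finset.sum_congr rfl fun r _ => Finset.sum_range_succ _ _

lemma prefRow_spec (g : List (List Int)) (ind : Int → Bool) (i C : Nat) (prev : List Int)
    (hp : ∀ j, j ≤ C → prev.getD j 0 = S g ind i j) :
    (prefRow prev g i C ind).length = C + 1 ∧
      ∀ j, j ≤ C → (prefRow prev g i C ind).getD j 0 = S g ind (i + 1) j := by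
  unfold prefRow
  suffices h : ∀ n, n ≤ C →
      ((List.range n).foldl (fun row c => row ++ [prev.getD (c + 1) 0 + row.getD c 0 - prev.getD c 0 +
        (if ind (gget g i c) then 1 else 0)]) [0]).length = n + 1 ∧
      ∀ j, j ≤ n → ((List.range n).foldl (fun row c => row ++ [prev.getD (c + 1) 0 + row.getD c 0 - prev.getD c 0 +
        (if ind (gget g i c) then 1 else 0)]) [0]).getD j 0 = S g ind (i + 1) j by
    exact ⟨(h C le_rfl).1, (h C le_rfl).2⟩
  intro n
  induction n with
  | zero =>
    intro _
    refine ⟨rfl, ?_⟩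
    intro j hj
    interval_cases j
    show (0 : Int) = S g ind (i + 1) 0
    simp [S]
  | succ n ih =>
    intro hn
    obtain ⟨hlen, hval⟩ := ih (by omega)
    rw [List.range_succ, List.foldl_append, List.foldl_cons, List.foldl_nil]
    constructor
    · rw [List.length_append, hlen]; rfl
    · intro j hj
      by_cases hjn : j ≤ n
      · rw [List.getD_append _ _ _ _ (by omega)]
        exact hval j hjn
      · have hj1 : j = n + 1 := by omega
        subst hj1
        rw [List.getD_eq_getElem?_getD, List.getElem?_append_right (by omega)]
        simp only [hlen, Nat.sub_self, List.getElem?_cons_zero, Option.getD_some]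
        rw [hp (n + 1) (by omega), hp n (by omega), hval n (by omega)]
        rw [S_succ_right g ind i n, S_succ_right g ind (i + 1) n, Finset.sum_range_succ]
        ring

lemma prefTab_spec (g : List (List Int)) (ind : Int → Bool) (R C : Nat) :
    ∀ i, i ≤ R → ∀ j, j ≤ C → gget (prefTab g R C ind) i j = S g ind i j := by
  unfold gget prefTab
  suffices h : ∀ n, n ≤ R →
      ((List.range n).foldl (fun tab r => tab ++ [prefRow (tab.getD r []) g r C ind])
        [List.replicate (C + 1) (0 : Int)]).length = n + 1 ∧
      ∀ i, i ≤ n → ∀ j, j ≤ C →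
        (((List.range n).foldl (fun tab r => tab ++ [prefRow (tab.getD r []) g r C ind])
          [List.replicate (C + 1) (0 : Int)]).getD i []).getD j 0 = S g ind i j by
    exact (h R le_rfl).2
  intro n
  induction n with
  | zero =>
    intro _
    refine ⟨rfl, ?_⟩
    intro i hi j hj
    interval_cases i
    show (List.replicate (C + 1) (0 : Int)).getD j 0 = S g ind 0 j
    rw [List.getD_eq_getElem?_getD, List.getElem?_replicate, if_pos (by omega)]
    simp [S]
  | succ n ih =>
    intro hn
    obtain ⟨hlen, hval⟩ := ih (by omega)
    rw [List.range_succ, List.foldl_append, List.foldl_cons, List.foldl_nil]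
    have hrow := prefRow_spec g ind n C _ (fun j hj => hval n le_rfl j hj)
    constructor
    · rw [List.length_append, hlen]; rfl
    · intro i hi j hj
      by_cases hin : i ≤ n
      · rw [List.getD_append _ _ _ _ (by omega)]
        exact hval i hin j hj
      · have hi1 : i = n + 1 := by omega
        subst hi1
        have houter : ∀ (tab : List (List Int)) (row : List Int), tab.length = n + 1 →
            (tab ++ [row]).getD (n + 1) [] = row := by
          intro tab row hl
          rw [List.getD_eq_getElem?_getD, List.getElem?_append_right (by omega)]
          simp [hl]
        rw [houter _ _ hlen]
        exact hrow.2 j hj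

lemma cnt_spec (g : List (List Int)) (ind : Int → Bool) (R C r1 r2 c1 c2 : Nat)
    (h1 : r1 ≤ r2) (h2 : r2 < R) (h3 : c1 ≤ c2) (h4 : c2 < C) :
    cnt (prefTab g R C ind) r1 r2 c1 c2 = rcnt g ind r1 r2 c1 c2 := by
  unfold cnt
  rw [prefTab_spec g ind R C (r2 + 1) (by omega) (c2 + 1) (by omega),
    prefTab_spec g ind R C r1 (by omega) (c2 + 1) (by omega),
    prefTab_spec g ind R C (r2 + 1) (by omega) c1 (by omega),
    prefTab_spec g ind R C r1 (by omega) c1 (by omega)]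
  unfold rcnt
  have hinner : ∀ r, ∑ c ∈ Finset.Ico c1 (c2 + 1), (if ind (gget g r c) then (1:Int) else 0)
      = (∑ c ∈ Finset.range (c2 + 1), (if ind (gget g r c) then (1:Int) else 0))
        - ∑ c ∈ Finset.range c1, (if ind (gget g r c) then (1:Int) else 0) :=
    fun r => Finset.sum_Ico_eq_sub _ (by omega)
  rw [Finset.sum_congr rfl (fun r _ => hinner r), Finset.sum_sub_distrib,
    Finset.sum_Ico_eq_sub _ (by omega : r1 ≤ r2 + 1),
    Finset.sum_Ico_eq_sub _ (by omega : r1 ≤ r2 + 1)]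
  unfold S
  ring

lemma rcnt_eq_zero_iff (g : List (List Int)) (ind : Int → Bool) (r1 r2 c1 c2 : Nat) :
    rcnt g ind r1 r2 c1 c2 = 0 ↔
      ∀ r c, r1 ≤ r → r ≤ r2 → c1 ≤ c → c ≤ c2 → ind (gget g r c) = false := by
  unfold rcnt
  constructor
  · intro h r c hr1 hr2 hc1 hc2
    have h1 := (Finset.sum_eq_zero_iff_of_nonneg
      (fun r _ => Finset.sum_nonneg (fun c _ => by split <;> norm_num))).mp h r
      (Finset.mem_Ico.mpr ⟨hr1, by omega⟩)
    have h2 := (Finset.sum_eq_zero_iff_of_nonneg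
      (fun c _ => by split <;> norm_num)).mp h1 c (Finset.mem_Ico.mpr ⟨hc1, by omega⟩)
    rcases hb : ind (gget g r c)
    · rfl
    · rw [hb, if_pos rfl] at h2; exact absurd h2 one_ne_zero
  · intro h
    apply Finset.sum_eq_zero
    intro r hr
    apply Finset.sum_eq_zero
    intro c hc
    rw [Finset.mem_Ico] at hr hc
    rw [h r c (by omega) (by omega) (by omega) (by omega), if_neg (by simp)]

lemma rcnt_eq_card_iff (g : List (List Int)) (ind : Int → Bool) (r1 r2 c1 c2 : Nat)
    (h1 : r1 ≤ r2) (h3 : c1 ≤ c2) :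
    rcnt g ind r1 r2 c1 c2 = ((r2 - r1 + 1) * (c2 - c1 + 1) : Nat) ↔
      ∀ r c, r1 ≤ r → r ≤ r2 → c1 ≤ c → c ≤ c2 → ind (gget g r c) = true := by
  have key : rcnt g ind r1 r2 c1 c2 + rcnt g (fun v => ! ind v) r1 r2 c1 c2
      = ((r2 - r1 + 1) * (c2 - c1 + 1) : Nat) := by
    unfold rcnt
    rw [← Finset.sum_add_distrib]
    have : ∀ r ∈ Finset.Ico r1 (r2+1),
        (∑ c ∈ Finset.Ico c1 (c2 + 1), (if ind (gget g r c) then (1:Int) else 0))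
          + (∑ c ∈ Finset.Ico c1 (c2 + 1), (if (! ind (gget g r c)) then (1:Int) else 0))
        = ∑ c ∈ Finset.Ico c1 (c2 + 1), (1:Int) := by
      intro r _
      rw [← Finset.sum_add_distrib]
      apply Finset.sum_congr rfl
      intro c _
      rcases hb : ind (gget g r c) <;> norm_num
    rw [Finset.sum_congr rfl this]
    simp only [Finset.sum_const, Nat.card_Ico, nsmul_eq_mul, mul_one]
    push_cast
    have e1 : (r2 + 1 - r1 : Nat) = (r2 - r1 + 1 : Nat) := by omega
    have e2 : (c2 + 1 - c1 : Nat) = (c2 - c1 + 1 : Nat) := by omega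
    rw [e1, e2]
    push_cast
    ring
  constructor
  · intro h r c hr1 hr2 hc1 hc2
    have h0 : rcnt g (fun v => ! ind v) r1 r2 c1 c2 = 0 := by omega
    have := (rcnt_eq_zero_iff g (fun v => ! ind v) r1 r2 c1 c2).mp h0 r c hr1 hr2 hc1 hc2
    simpa using this
  · intro h
    have h0 : rcnt g (fun v => ! ind v) r1 r2 c1 c2 = 0 := by
      rw [rcnt_eq_zero_iff]
      intro r c hr1 hr2 hc1 hc2
      simp [h r c hr1 hr2 hc1 hc2]
    omega

lemma cntnz_eq_allZero (g : List (List Int)) (R C r1 r2 c1 c2 : Nat)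
    (h1 : r1 ≤ r2) (h2 : r2 < R) (h3 : c1 ≤ c2) (h4 : c2 < C) :
    (cnt (prefTab g R C (fun v => v != 0)) r1 r2 c1 c2 == 0) = allZero g r1 r2 c1 c2 := by
  apply bool_eq_of_iff
  rw [beq_iff_eq, cnt_spec g _ R C r1 r2 c1 c2 h1 h2 h3 h4, rcnt_eq_zero_iff, allZero_iff]
  constructor
  · intro h r c a b cc d; have := h r c a b cc d; simpa using this
  · intro h r c a b cc d; simpa using h r c a b cc d

lemma cnt5row (g : List (List Int)) (R C r c1 c2 : Nat)
    (hr : r < R) (h3 : c1 ≤ c2) (h4 : c2 < C) :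
    (cnt (prefTab g R C (fun v => v == 5)) r r c1 c2 == ((c2 - c1 + 1 : Nat) : Int))
      = rowAll5 g r c1 c2 := by
  apply bool_eq_of_iff
  rw [beq_iff_eq, cnt_spec g _ R C r r c1 c2 le_rfl hr h3 h4, rowAll5_iff]
  have hcard := rcnt_eq_card_iff g (fun v => v == 5) r r c1 c2 le_rfl h3
  rw [show ((r - r + 1) * (c2 - c1 + 1) : Nat) = (c2 - c1 + 1 : Nat) by simp] at hcard
  rw [hcard]
  constructor
  · intro h c a b; have := h r c le_rfl le_rfl a b; simpa using this
  · intro h r' c a b e f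
    have hrr : r' = r := by omega
    subst hrr
    simp [h c e f]

lemma cnt5col (g : List (List Int)) (R C r1 r2 c : Nat)
    (h1 : r1 ≤ r2) (h2 : r2 < R) (hc : c < C) :
    (cnt (prefTab g R C (fun v => v == 5)) r1 r2 c c == ((r2 - r1 + 1 : Nat) : Int))
      = colAll5 g c r1 r2 := by
  apply bool_eq_of_iff
  rw [beq_iff_eq, cnt_spec g _ R C r1 r2 c c h1 h2 le_rfl hc, colAll5_iff]
  have hcard := rcnt_eq_card_iff g (fun v => v == 5) r1 r2 c c h1 le_rfl
  rw [show ((r2 - r1 + 1) * (c - c + 1) : Nat) = (r2 - r1 + 1 : Nat) by simp] at hcard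
  rw [hcard]
  constructor
  · intro h r a b; have := h r c a b le_rfl le_rfl; simpa using this
  · intro h r c' a b e f
    have hcc : c' = c := by omega
    subst hcc
    simp [h r a b]

lemma checkB_eq_qual (g : List (List Int)) (R C r1 r2 c1 c2 : Nat)
    (h1 : r1 ≤ r2) (h2 : r2 < R) (h3 : c1 ≤ c2) (h4 : c2 < C) :
    checkB (prefTab g R C (fun v => v != 0)) (prefTab g R C (fun v => v == 5)) R C r1 r2 c1 c2
      = qual g R C r1 r2 c1 c2 := by
  have e1 := cntnz_eq_allZero g R C r1 r2 c1 c2 h1 h2 h3 h4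
  have e2 : (!(decide (0 < r1)) ||
      cnt (prefTab g R C (fun v => v == 5)) (r1 - 1) (r1 - 1) c1 c2 == ((c2 - c1 + 1 : Nat) : Int))
      = (!(decide (0 < r1)) || rowAll5 g (r1 - 1) c1 c2) := by
    by_cases hg : 0 < r1
    · simp only [hg, decide_true, Bool.not_true, Bool.false_or]
      exact cnt5row g R C (r1 - 1) c1 c2 (by omega) h3 h4
    · simp [hg]
  have e3 : (!(decide (r2 < R - 1)) ||
      cnt (prefTab g R C (fun v => v == 5)) (r2 + 1) (r2 + 1) c1 c2 == ((c2 - c1 + 1 : Nat) : Int))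
      = (!(decide (r2 < R - 1)) || rowAll5 g (r2 + 1) c1 c2) := by
    by_cases hg : r2 < R - 1
    · simp only [hg, decide_true, Bool.not_true, Bool.false_or]
      exact cnt5row g R C (r2 + 1) c1 c2 (by omega) h3 h4
    · simp [hg]
  have e4 : (!(decide (0 < c1)) ||
      cnt (prefTab g R C (fun v => v == 5)) r1 r2 (c1 - 1) (c1 - 1) == ((r2 - r1 + 1 : Nat) : Int))
      = (!(decide (0 < c1)) || colAll5 g (c1 - 1) r1 r2) := by
    by_cases hg : 0 < c1
    · simp only [hg, decide_true, Bool.not_true, Bool.false_or]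
      exact cnt5col g R C r1 r2 (c1 - 1) h1 h2 (by omega)
    · simp [hg]
  have e5 : (!(decide (c2 < C - 1)) ||
      cnt (prefTab g R C (fun v => v == 5)) r1 r2 (c2 + 1) (c2 + 1) == ((r2 - r1 + 1 : Nat) : Int))
      = (!(decide (c2 < C - 1)) || colAll5 g (c2 + 1) r1 r2) := by
    by_cases hg : c2 < C - 1
    · simp only [hg, decide_true, Bool.not_true, Bool.false_or]
      exact cnt5col g R C r1 r2 (c2 + 1) h1 h2 (by omega)
    · simp [hg]
  unfold checkB qual
  rw [e1, e2, e3, e4, e5]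

lemma fillB_fills_mem (g0 : List (List Int)) (F : List (Nat × Nat × Nat × Nat))
    {x : Nat × Nat × Nat × Nat} (hx : x ∈ F) :
    fillB (fills g0 F) x.1 x.2.1 x.2.2.1 x.2.2.2 = fills g0 F := by
  apply ext_gget
  · rw [length_fillB]
  · intro r _; rw [rowlen_fillB]
  · intro r c hr hc
    rw [length_fillB, length_fills] at hr
    rw [rowlen_fillB, rowlen_fills] at hc
    rw [gget_fillB]
    split_ifs with h
    · rw [gget_fills, if_pos ⟨hr, hc, List.any_eq_true.mpr
        ⟨x, hx,
          (by simp only [InCellB, decide_eq_true_eq]; exact ⟨h.1, h.2.1, h.2.2.1, h.2.2.2.1⟩)⟩⟩]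
    · rfl

lemma qual_fills_mem_false (g0 : List (List Int)) (R C : Nat)
    (hR : g0.length = R) (hC : ∀ r, r < R → C ≤ (g0.getD r []).length)
    (F : List (Nat × Nat × Nat × Nat)) (hF : ∀ x ∈ F, Ok0 g0 R C x)
    {x : Nat × Nat × Nat × Nat} (hx : x ∈ F) :
    qual (fills g0 F) R C x.1 x.2.1 x.2.2.1 x.2.2.2 = false := by
  obtain ⟨⟨hab, hbR, hcd, hdC⟩, hq⟩ := hF x hx
  have h4 : gget (fills g0 F) x.1 x.2.2.1 = 4 := by
    rw [gget_fills, if_pos ⟨by omega, by have := hC x.1 (by omega); omega,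
      List.any_eq_true.mpr ⟨x, hx,
        (by simp only [InCellB, decide_eq_true_eq]; exact ⟨le_rfl, hab, le_rfl, hcd⟩)⟩⟩]
  have hAZ : allZero (fills g0 F) x.1 x.2.1 x.2.2.1 x.2.2.2 = false := by
    rcases hb : allZero (fills g0 F) x.1 x.2.1 x.2.2.1 x.2.2.2
    · rfl
    · have := (allZero_iff _ _ _ _ _).mp hb x.1 x.2.2.1 le_rfl hab le_rfl hcd
      rw [h4] at this
      exact absurd this (by norm_num)
  simp [qual, hAZ]

lemma qual_fills (g0 : List (List Int)) (R C : Nat)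
    (hR : g0.length = R) (hC : ∀ r, r < R → C ≤ (g0.getD r []).length)
    (F : List (Nat × Nat × Nat × Nat)) (hF : ∀ x ∈ F, Ok0 g0 R C x)
    (r1 r2 c1 c2 : Nat) (hin : InRange R C (r1, r2, c1, c2))
    (hnot : (r1, r2, c1, c2) ∉ F) :
    qual (fills g0 F) R C r1 r2 c1 c2 = qual g0 R C r1 r2 c1 c2 := by
  obtain ⟨hab0, hbR0, hcd0, hdC0⟩ := hin
  have hab : r1 ≤ r2 := hab0
  have hbR : r2 < R := hbR0
  have hcd : c1 ≤ c2 := hcd0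
  have hdC : c2 < C := hdC0
  have hcell : ∀ r c, r < R → c < C → gget (fills g0 F) r c =
      if F.any (fun x => InCellB x r c) then 4 else gget g0 r c := by
    intro r c hr hc
    rw [gget_fills]
    by_cases ha : F.any (fun x => InCellB x r c) = true
    · rw [if_pos ⟨by omega, by have := hC r hr; omega, ha⟩, if_pos ha]
    · rw [if_neg (by tauto), if_neg ha]
  have hzero : ∀ r c, F.any (fun x => InCellB x r c) = true → gget g0 r c = 0 := by
    intro r c ha
    obtain ⟨x, hxF, hxc⟩ := List.any_eq_true.mp ha
    simp only [InCellB, decide_eq_true_eq] at hxc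
    exact qual_interior (hF x hxF).2 r c hxc.1 hxc.2.1 hxc.2.2.1 hxc.2.2.2
  have hc5 : ∀ r c, r < R → c < C →
      (gget (fills g0 F) r c = 5 ↔ gget g0 r c = 5) := by
    intro r c hr hc
    rw [hcell r c hr hc]
    by_cases ha : F.any (fun x => InCellB x r c) = true
    · rw [if_pos ha, hzero r c ha]
      constructor <;> intro h <;> exact absurd h (by norm_num)
    · rw [if_neg ha]
  have erow : ∀ r, r < R → rowAll5 (fills g0 F) r c1 c2 = rowAll5 g0 r c1 c2 := by
    intro r hr
    apply bool_eq_of_iff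
    rw [rowAll5_iff, rowAll5_iff]
    constructor
    · intro h c a b; exact (hc5 r c hr (by omega)).mp (h c a b)
    · intro h c a b; exact (hc5 r c hr (by omega)).mpr (h c a b)
  have ecol : ∀ c, c < C → colAll5 (fills g0 F) c r1 r2 = colAll5 g0 c r1 r2 := by
    intro c hc
    apply bool_eq_of_iff
    rw [colAll5_iff, colAll5_iff]
    constructor
    · intro h r a b; exact (hc5 r c (by omega) hc).mp (h r a b)
    · intro h r a b; exact (hc5 r c (by omega) hc).mpr (h r a b)
  by_cases hov : ∃ r c, r1 ≤ r ∧ r ≤ r2 ∧ c1 ≤ c ∧ c ≤ c2 ∧ F.any (fun x => InCellB x r c) = true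
  · obtain ⟨r, c, har, hbr, hac, hbc, hany⟩ := hov
    have h4 : gget (fills g0 F) r c = 4 := by
      rw [hcell r c (by omega) (by omega), if_pos hany]
    have hAZf : allZero (fills g0 F) r1 r2 c1 c2 = false := by
      rcases hb : allZero (fills g0 F) r1 r2 c1 c2
      · rfl
      · have := (allZero_iff _ _ _ _ _).mp hb r c har hbr hac hbc
        rw [h4] at this
        exact absurd this (by norm_num)
    have hq1 : qual (fills g0 F) R C r1 r2 c1 c2 = false := by simp [qual, hAZf]
    have hq2 : qual g0 R C r1 r2 c1 c2 = false := by
      rcases hb : qual g0 R C r1 r2 c1 c2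
      · rfl
      · exfalso
        obtain ⟨x, hxF, hxc⟩ := List.any_eq_true.mp hany
        have hxeq : (r1, r2, c1, c2) = x :=
          overlap_eq (g := g0) (R := R) (C := C) ⟨⟨hab, hbR, hcd, hdC⟩, hb⟩ (hF x hxF)
            (rr := r) (cc := c)
            (by simp only [InCellB, decide_eq_true_eq]; exact ⟨har, hbr, hac, hbc⟩) hxc
        exact hnot (hxeq ▸ hxF)
    rw [hq1, hq2]
  · have hAZ : allZero (fills g0 F) r1 r2 c1 c2 = allZero g0 r1 r2 c1 c2 := by
      apply bool_eq_of_iff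
      rw [allZero_iff, allZero_iff]
      have hnof : ∀ r c, r1 ≤ r → r ≤ r2 → c1 ≤ c → c ≤ c2 →
          ¬ F.any (fun x => InCellB x r c) = true :=
        fun r c a b cc d ha => hov ⟨r, c, a, b, cc, d, ha⟩
      constructor
      · intro h r c a b cc d
        have hval := h r c a b cc d
        rw [hcell r c (by omega) (by omega), if_neg (hnof r c a b cc d)] at hval
        exact hval
      · intro h r c a b cc d
        rw [hcell r c (by omega) (by omega), if_neg (hnof r c a b cc d)]
        exact h r c a b cc d
    have t3 : (!(decide (r2 < R - 1)) || rowAll5 (fills g0 F) (r2 + 1) c1 c2)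
        = (!(decide (r2 < R - 1)) || rowAll5 g0 (r2 + 1) c1 c2) := by
      by_cases hg : r2 < R - 1
      · simp only [hg, decide_true, Bool.not_true, Bool.false_or]
        exact erow (r2 + 1) (by omega)
      · simp [hg]
    have t5 : (!(decide (c2 < C - 1)) || colAll5 (fills g0 F) (c2 + 1) r1 r2)
        = (!(decide (c2 < C - 1)) || colAll5 g0 (c2 + 1) r1 r2) := by
      by_cases hg : c2 < C - 1
      · simp only [hg, decide_true, Bool.not_true, Bool.false_or]
        exact ecol (c2 + 1) (by omega)
      · simp [hg]
    unfold qual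
    rw [hAZ, erow (r1 - 1) (by omega), t3, ecol (c1 - 1) (by omega), t5]

def stepQ (g0 : List (List Int)) (R C : Nat) (g : List (List Int))
    (x : Nat × Nat × Nat × Nat) : List (List Int) :=
  if qual g0 R C x.1 x.2.1 x.2.2.1 x.2.2.2 then fillB g x.1 x.2.1 x.2.2.1 x.2.2.2 else g

lemma loop_eq (g0 : List (List Int)) (R C : Nat)
    (hR : g0.length = R) (hC : ∀ r, r < R → C ≤ (g0.getD r []).length) :
    ∀ (l : List (Nat × Nat × Nat × Nat)) (F : List (Nat × Nat × Nat × Nat)),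
      (∀ x ∈ l, InRange R C x) → (∀ x ∈ F, Ok0 g0 R C x) →
      l.foldl (stepA R C) (fills g0 F) = l.foldl (stepQ g0 R C) (fills g0 F) := by
  intro l
  induction l with
  | nil => intro F _ _; rfl
  | cons x l ih =>
    intro F hl hF
    have hx : InRange R C x := hl x List.mem_cons_self
    have hl' : ∀ y ∈ l, InRange R C y := fun y hy => hl y (List.mem_cons_of_mem _ hy)
    rw [List.foldl_cons, List.foldl_cons]
    by_cases hxF : x ∈ F
    · have hOk := hF x hxF
      have e1 : stepA R C (fills g0 F) x = fills g0 F := by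
        unfold stepA
        rw [if_neg (by rw [qual_fills_mem_false g0 R C hR hC F hF hxF]; simp)]
      have e2 : stepQ g0 R C (fills g0 F) x = fills g0 F := by
        unfold stepQ
        rw [if_pos hOk.2]
        exact fillB_fills_mem g0 F hxF
      rw [e1, e2]
      exact ih F hl' hF
    · have hxnot : (x.1, x.2.1, x.2.2.1, x.2.2.2) ∉ F := by
        rw [show (x.1, x.2.1, x.2.2.1, x.2.2.2) = x from rfl]
        exact hxF
      have hq := qual_fills g0 R C hR hC F hF x.1 x.2.1 x.2.2.1 x.2.2.2 hx hxnot
      by_cases hq0 : qual g0 R C x.1 x.2.1 x.2.2.1 x.2.2.2 = true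
      · have efill : fillB (fills g0 F) x.1 x.2.1 x.2.2.1 x.2.2.2 = fills g0 (F ++ [x]) := by
          unfold fills
          rw [List.foldl_append]
          rfl
        have e1 : stepA R C (fills g0 F) x = fills g0 (F ++ [x]) := by
          unfold stepA
          rw [if_pos (by rw [hq]; exact hq0), fillA_eq_fillB]
          exact efill
        have e2 : stepQ g0 R C (fills g0 F) x = fills g0 (F ++ [x]) := by
          unfold stepQ
          rw [if_pos hq0]
          exact efill
        rw [e1, e2]
        exact ih (F ++ [x]) hl' (by
          intro y hy
          rcases List.mem_append.mp hy with h | h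
          · exact hF y h
          · rw [List.mem_singleton.mp h]; exact ⟨hx, hq0⟩)
      · have e1 : stepA R C (fills g0 F) x = fills g0 F := by
          unfold stepA
          rw [if_neg (by rw [hq]; exact hq0)]
        have e2 : stepQ g0 R C (fills g0 F) x = fills g0 F := by
          unfold stepQ
          rw [if_neg hq0]
        rw [e1, e2]
        exact ih F hl' hF

lemma mem_rects {R C : Nat} {x : Nat × Nat × Nat × Nat} (h : x ∈ rects R C) :
    InRange R C x := by
  simp only [rects, List.mem_flatMap, List.mem_map, List.mem_range, mem_rng] at h
  obtain ⟨r1, hr1, r2, hr2, c1, hc1, c2, hc2, rfl⟩ := h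
  exact ⟨hr2.1, (show r2 < R by omega), hc2.1, (show c2 < C by omega)⟩

-- ===== VERDICT (by name: the statement is the Claim_ definition above) =====
theorem transform_spec : Claim_equal_transform := by
  intro grid_lst _hDom hPre
  unfold Spec_transform
  by_cases hg : grid_lst.isEmpty || grid_lst.headI.isEmpty
  · simp [transform, transform_alt, hg]
  · have hR0 : grid_lst ≠ [] := by
      intro h; subst h; simp at hg
    simp only [transform, transform_alt, hg]
    set R := grid_lst.length with hRdef
    set C := grid_lst.headI.length with hCdef
    have hC : ∀ r, r < R → C ≤ (grid_lst.getD r []).length := by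
      intro r hr
      have : grid_lst.getD r [] ∈ grid_lst := by
        rw [List.getD_eq_getElem?_getD, List.getElem?_eq_getElem hr]
        exact List.getElem_mem hr
      exact hPre _ this
    have h1 : (rects R C).foldl (stepA R C) grid_lst
        = (rects R C).foldl (stepQ grid_lst R C) grid_lst := by
      have := loop_eq grid_lst R C rfl hC (rects R C) [] (fun x hx => mem_rects hx)
        (by intro x hx; simp at hx)
      simpa [fills] using this
    have h2 : (rects R C).foldl
        (stepB (prefTab grid_lst R C (fun v => v != 0)) (prefTab grid_lst R C (fun v => v == 5)) R C)
        grid_lst = (rects R C).foldl (stepQ grid_lst R C) grid_lst := by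
      apply PySem.List.foldl_congr_mem
      intro acc x hx
      obtain ⟨ha, hb, hc, hd⟩ := mem_rects hx
      simp only [stepB, stepQ, checkB_eq_qual grid_lst R C x.1 x.2.1 x.2.2.1 x.2.2.2 ha hb hc hd]
    rw [h1, h2]
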